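-- pv_equiv track=rewrite | github.com/animeshokhade/dsa | scaler/Change character.py | solve
-- ===== SOURCE A (Python) =====
-- def solve(A, B):
--     lst = list(A)
--     test = dict()
--
--     for char in lst:
--         if char in test:
--             test[char] += 1
--         else:
--             test[char] = 1
--
--     for b in range(B):
--         min_value = min(test.values())
--         key = [k for k in test if test[k] == min_value]
--         test[key[0]] -= 1
--         if test[key[0]] == 0:
--             del test[key[0]]
--
--     return len(test)
-- ===== SOURCE B (Python) =====
-- def solve(A, B):
--     counts = {}
--     for ch in A:
--         counts[ch] = counts.get(ch, 0) + 1
--     vals = sorted(counts.values())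
--     remaining = B
--     k = len(vals)
--     for v in vals:
--         if remaining >= v:
--             remaining -= v
--             k -= 1
--         else:
--             break
--     return k
-- ===== Notes on version B (the rewrite author's own statement) =====
-- stated objective: faster
-- what changed: Instead of B rounds each scanning the whole dict for a minimum, B sorts the character counts ascending once and in a single pass subtracts them cumulatively from the budget, counting how many whole smallest groups are removable.
-- crash fix: When B > len(A) the removal loop in A empties the dict and min() of an empty sequence raises ValueError; B returns 0 (everything removed). — e.g. on solve("", 1): A raises ValueError, B returns 0
import Mathlib
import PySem

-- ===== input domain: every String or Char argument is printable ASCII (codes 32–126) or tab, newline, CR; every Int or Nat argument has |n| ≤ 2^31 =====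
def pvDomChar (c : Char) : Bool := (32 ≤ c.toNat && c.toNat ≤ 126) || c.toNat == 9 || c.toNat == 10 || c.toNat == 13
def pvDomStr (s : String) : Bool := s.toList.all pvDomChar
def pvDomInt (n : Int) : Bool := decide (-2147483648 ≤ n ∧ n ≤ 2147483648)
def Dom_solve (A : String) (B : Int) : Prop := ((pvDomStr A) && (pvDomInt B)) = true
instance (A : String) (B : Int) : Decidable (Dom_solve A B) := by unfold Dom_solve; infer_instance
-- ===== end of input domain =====

-- B replaces A's B rounds of scanning the dict for a minimum by one ascending sort of the
-- counts and a single cumulative-subtraction pass (asymptotically faster); equal return values.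

-- ===== PORT A =====
-- one iteration of A's removal loop: take min of values, find first key with that value,
-- decrement it, delete it when it hits 0; `none` = the ValueError of min() on an empty dict
def stepA (d : PySem.Dict Char Int) : Option (PySem.Dict Char Int) :=
  match PySem.List.min? d.values (fun v => v) with
  | none => none
  | some m =>
    let ks := d.keys.filter (fun k => d.getD k 0 == m)
    match PySem.List.pyGet? ks 0 with
    | none => none
    | some k0 =>
      let d' := d.modify k0 0 (fun v => v - 1)
      if d'.getD k0 0 == 0 then some (d'.erase k0) else some d'

def solve (A : String) (B : Int) : Int :=
  let lst := A.toList
  let test := lst.foldl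
    (fun d c => if d.contains c then d.modify c 0 (fun v => v + 1) else d.insert c 1)
    PySem.Dict.empty
  match (PySem.List.pyRange 0 B 1).foldl (fun st _ => st.bind stepA) (some test) with
  | some d => (d.size : Int)
  | none => 0   -- unreachable under Pre_solve (min() of the emptied dict raised)

-- ===== PORT B =====
-- the `for v in vals: if remaining >= v: … else: break` loop of Source B
def removeSmallest : List Int → Int → Int → Int
  | [], _, k => k
  | v :: rest, rem, k => if rem ≥ v then removeSmallest rest (rem - v) (k - 1) else k

def solve_alt (A : String) (B : Int) : Int :=
  let counts := A.toList.foldl (fun d c => d.insert c (d.getD c 0 + 1)) PySem.Dict.empty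
  let vals := PySem.List.sorted counts.values (fun v => v) false
  removeSmallest vals B (counts.size : Int)

-- ===== PRECONDITION & SPEC =====
-- Pre_ excludes exactly the inputs with B > len(A), where A's min() raises ValueError.
def Pre_solve (A : String) (B : Int) : Prop := B ≤ PySem.Str.len A
instance (A : String) (B : Int) : Decidable (Pre_solve A B) := by unfold Pre_solve; infer_instance
def pvWitness_solve : String × Int := ("ab", 1)

-- When B > len(A) the removal loop in A empties the dict and min() raises ValueError; B returns 0.
def Raises_solve (A : String) (B : Int) : Prop := PySem.Str.len A < B
instance (A : String) (B : Int) : Decidable (Raises_solve A B) := by unfold Raises_solve; infer_instance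
def pvRaiseWitness_solve : String × Int := ("", 1)
def pvRaiseWitnessOut_solve : Int := 0

def Spec_solve (A : String) (B : Int) (out : Int) : Prop := out = solve_alt A B
instance (A : String) (B : Int) (out : Int) : Decidable (Spec_solve A B out) := by unfold Spec_solve; infer_instance

-- ===== CLAIM (what is proved, stated in full; the proofs are below) =====
def Claim_equal_solve : Prop := ∀ (A : String) (B : Int), Dom_solve A B → Pre_solve A B → Spec_solve A B (solve A B)
def Claim_raises_solve : Prop := (∀ (A : String) (B : Int), Dom_solve A B → Raises_solve A B → ¬ Pre_solve A B) ∧ (Dom_solve (pvRaiseWitness_solve.1) (pvRaiseWitness_solve.2) ∧ Raises_solve (pvRaiseWitness_solve.1) (pvRaiseWitness_solve.2) ∧ solve_alt (pvRaiseWitness_solve.1) (pvRaiseWitness_solve.2) = pvRaiseWitnessOut_solve)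

-- ===== LEMMAS AND PROOFS =====

-- abstract "remove one from a smallest group" on the value list, and its iteration
def stepv : List Int → List Int
  | [] => []
  | v :: rest => if v = 1 then rest else (v - 1) :: rest

def iterv : Nat → List Int → List Int
  | 0, s => s
  | t + 1, s => iterv t (stepv s)

-- A's loop, with the iteration count made explicit
def loopA : Nat → Option (PySem.Dict Char Int) → Option (PySem.Dict Char Int)
  | 0, st => st
  | t + 1, st => loopA t (st.bind stepA)

lemma foldl_bind_eq_loopA (l : List Int) (st : Option (PySem.Dict Char Int)) :
    l.foldl (fun st _ => st.bind stepA) st = loopA l.length st := by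
  induction l generalizing st with
  | nil => rfl
  | cons x xs ih => simpa [List.foldl, loopA] using ih (st.bind stepA)

lemma length_pyRange0 (B : Int) : (PySem.List.pyRange 0 B 1).length = B.toNat := by
  simp only [PySem.List.pyRange]
  norm_num
  omega

lemma iterv_nil (t : Nat) : iterv t [] = [] := by
  induction t with
  | zero => rfl
  | succ t ih => simpa [iterv, stepv] using ih

lemma iterv_add (a b : Nat) (s : List Int) : iterv (a + b) s = iterv b (iterv a s) := by
  induction a generalizing s with
  | zero => simp [iterv]
  | succ a ih =>
      have : a + 1 + b = (a + b) + 1 := by omega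
      rw [this]
      simpa [iterv] using ih (stepv s)

lemma iterv_partial (t : Nat) (v : Int) (rest : List Int) (h : (t : Int) < v) :
    iterv t (v :: rest) = (v - t) :: rest := by
  induction t generalizing v with
  | zero => simp [iterv]
  | succ t ih =>
      have hv1 : v ≠ 1 := by omega
      have h' : (t : Int) < v - 1 := by push_cast at h ⊢; omega
      rw [iterv, stepv]
      simp only [hv1, if_false]
      rw [ih (v - 1) h']
      congr 1
      push_cast
      ring

lemma iterv_full (tn : Nat) (v : Int) (rest : List Int) (h : v = (tn : Int) + 1) :
    iterv (tn + 1) (v :: rest) = rest := by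
  induction tn generalizing v rest with
  | zero =>
      subst h; simp [iterv, stepv]
  | succ tn ih =>
      have hv1 : v ≠ 1 := by omega
      rw [iterv, stepv]
      simp only [hv1, if_false]
      have : iterv (tn + 1) ((v - 1) :: rest) = rest := ih (v - 1) rest (by push_cast at h ⊢; omega)
      simpa [iterv] using this

lemma iterv_skip (v rem : Int) (rest : List Int) (hv : 1 ≤ v) (hvr : v ≤ rem) :
    iterv rem.toNat (v :: rest) = iterv (rem - v).toNat rest := by
  have hsplit : rem.toNat = v.toNat + (rem - v).toNat := by omega
  rw [hsplit, iterv_add]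
  congr 1
  have hv' : v.toNat = (v.toNat - 1) + 1 := by omega
  rw [hv']
  exact iterv_full _ v rest (by omega)

lemma removeSmallest_spec (s : List Int) (rem k : Int)
    (hpos : ∀ v ∈ s, 1 ≤ v) (hle : rem ≤ s.sum) :
    removeSmallest s rem k = k - s.length + (iterv rem.toNat s).length := by
  induction s generalizing rem k with
  | nil => simp [removeSmallest, iterv_nil]
  | cons v rest ih =>
      have hv : 1 ≤ v := hpos v (by simp)
      by_cases hge : rem ≥ v
      · rw [removeSmallest, if_pos hge, iterv_skip v rem rest hv hge]
        rw [ih (rem - v) (k - 1) (fun w hw => hpos w (by simp [hw])) (by simp at hle; omega)]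
        simp only [List.length_cons]
        push_cast
        ring
      · rw [removeSmallest, if_neg hge]
        have hlt : ((rem.toNat : Int)) < v := by omega
        rw [iterv_partial rem.toNat v rest hlt]
        simp only [List.length_cons]
        push_cast
        ring

-- head of the ascending sort is the min? value
lemma sorted_head_min (vals : List Int) (m : Int) (h : PySem.List.min? vals (fun v => v) = some m)
    {h0 : Int} {tail : List Int} (hs : PySem.List.sorted vals (fun v => v) false = h0 :: tail) :
    h0 = m := by
  have hperm := PySem.List.sorted_perm vals (fun v => v) false
  rw [hs] at hperm
  have hmem : h0 ∈ vals := hperm.mem_iff.mp (by simp)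
  have h1 : m ≤ h0 := PySem.List.min?_isMin h h0 hmem
  have hmm : m ∈ vals := PySem.List.min?_mem h
  have hmem2 : m ∈ h0 :: tail := hperm.mem_iff.mpr hmm
  have hpw := PySem.List.sorted_pairwise vals (fun v => v)
  rw [hs] at hpw
  rcases List.pairwise_cons.mp hpw with ⟨hall, _⟩
  rcases List.mem_cons.mp hmem2 with h2 | h2
  · omega
  · have := hall m h2; omega

-- the single-step lemma: one iteration of A's loop acts as stepv on the sorted value list
lemma stepA_spec (d : PySem.Dict Char Int) (hnd : d.keys.Nodup)
    (hpos : ∀ v ∈ d.values, 1 ≤ v) (hne : d.values ≠ []) :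
    ∃ d', stepA d = some d' ∧ d'.keys.Nodup ∧ (∀ v ∈ d'.values, 1 ≤ v) ∧
      d'.values.sum = d.values.sum - 1 ∧
      PySem.List.sorted d'.values (fun v => v) false
        = stepv (PySem.List.sorted d.values (fun v => v) false) := by
  -- the minimum exists
  obtain ⟨m, hm⟩ : ∃ m, PySem.List.min? d.values (fun v => v) = some m := by
    cases h : PySem.List.min? d.values (fun v => v) with
    | none => exact absurd ((PySem.List.min?_eq_none_iff _ _).mp h) hne
    | some m => exact ⟨m, rfl⟩
  -- a key k0 carrying the minimum, as chosen by the filter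
  have hmmem : m ∈ d.values := PySem.List.min?_mem hm
  obtain ⟨k0, ktail, hks⟩ : ∃ k0 ktail,
      d.keys.filter (fun k => d.getD k 0 == m) = k0 :: ktail := by
    have : ∃ k ∈ d.keys, d.getD k 0 = m := by
      rw [PySem.Dict.values_eq_map_keys d hnd 0] at hmmem
      simpa using hmmem
    obtain ⟨k, hk, hkm⟩ := this
    cases hf : d.keys.filter (fun k => d.getD k 0 == m) with
    | nil =>
        have hmem : k ∈ d.keys.filter (fun k => d.getD k 0 == m) :=
          List.mem_filter.mpr ⟨hk, by simp [hkm]⟩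
        rw [hf] at hmem
        exact absurd hmem (List.not_mem_nil)
    | cons a b => exact ⟨a, b, rfl⟩
  have hk0mem : k0 ∈ d.keys ∧ d.getD k0 0 = m := by
    have : k0 ∈ d.keys.filter (fun k => d.getD k 0 == m) := by simp [hks]
    have h2 := List.mem_filter.mp this
    exact ⟨h2.1, by simpa using h2.2⟩
  -- decompose the items list around k0's entry
  obtain ⟨p, hpmem, hpk⟩ : ∃ p ∈ d.items, p.1 = k0 := by
    have : k0 ∈ d.items.map (fun q => q.1) := hk0mem.1
    simpa using this
  have hpval : p.2 = m := by
    have := PySem.Dict.getD_of_mem_items d (k := k0) (v := p.2)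
      (by rw [← hpk]; exact hpmem) hnd 0
    rw [this] at hk0mem
    exact hk0mem.2
  have hpeq : p = (k0, m) := by rw [← hpk, ← hpval]
  rw [hpeq] at hpmem
  obtain ⟨L1, L2, hd⟩ := List.append_of_mem hpmem
  have hkeys : d.keys = L1.map (fun q => q.1) ++ k0 :: L2.map (fun q => q.1) := by
    simp [PySem.Dict.keys, hd]
  have hvals : d.values = L1.map (fun q => q.2) ++ m :: L2.map (fun q => q.2) := by
    simp [PySem.Dict.values, hd]
  have hndk := hnd
  rw [hkeys, List.nodup_append] at hndk
  obtain ⟨hnd1, hnd2, hdisj⟩ := hndk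
  have hk0L1 : k0 ∉ L1.map (fun q => q.1) := fun h => hdisj k0 h k0 (by simp) rfl
  have hk0L2 : k0 ∉ L2.map (fun q => q.1) := (List.nodup_cons.mp hnd2).1
  -- the modify step
  have hcont : d.contains k0 = true := (PySem.Dict.contains_iff_mem_keys d k0).mpr hk0mem.1
  have hmod : (d.modify k0 0 (fun v => v - 1)).items = L1 ++ (k0, m - 1) :: L2 := by
    rw [PySem.Dict.modify, hk0mem.2, PySem.Dict.items_insert_of_contains d (m - 1) hcont, hd]
    rw [List.map_append, List.map_cons]
    simp only [BEq.rfl, if_true]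
    congr 1
    · refine (List.map_congr_left ?_).trans (List.map_id L1)
      intro q hq
      have : q.1 ≠ k0 := fun h => hk0L1 (by rw [← h]; exact List.mem_map_of_mem hq)
      simp [this]
    · congr 1
      refine (List.map_congr_left ?_).trans (List.map_id L2)
      intro q hq
      have : q.1 ≠ k0 := fun h => hk0L2 (by rw [← h]; exact List.mem_map_of_mem hq)
      simp [this]
  have hgd' : (d.modify k0 0 (fun v => v - 1)).getD k0 0 = m - 1 := by
    rw [PySem.Dict.getD_modify_self, hk0mem.2]
  -- the sorted value list starts with the minimum m
  obtain ⟨h0, tail, hs⟩ : ∃ h0 tail,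
      PySem.List.sorted d.values (fun v => v) false = h0 :: tail := by
    cases h : PySem.List.sorted d.values (fun v => v) false with
    | nil => exact absurd ((PySem.List.sorted_eq_nil_iff _ _ _).mp h) hne
    | cons a b => exact ⟨a, b, rfl⟩
  have hh0 : h0 = m := sorted_head_min d.values m hm hs
  rw [hh0] at hs
  have hperm0 : (PySem.List.sorted d.values (fun v => v) false).Perm d.values :=
    PySem.List.sorted_perm _ _ _
  have hpw0 := PySem.List.sorted_pairwise d.values (fun v => v)
  rw [hs] at hperm0 hpw0
  have htail : tail.Perm (L1.map (fun q => q.2) ++ L2.map (fun q => q.2)) := by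
    have : (m :: tail).Perm (m :: (L1.map (fun q => q.2) ++ L2.map (fun q => q.2))) :=
      hperm0.trans (by rw [hvals]; exact List.perm_middle)
    exact this.cons_inv
  have hpwtail : List.Pairwise (fun a b => a ≤ b) tail := (List.pairwise_cons.mp hpw0).2
  have hmle : ∀ x ∈ tail, m ≤ x := (List.pairwise_cons.mp hpw0).1
  have hmpos : 1 ≤ m := hpos m hmmem
  -- a membership helper: every value of L1/L2 is a value of d
  have hsub : ∀ v, v ∈ L1.map (fun q => q.2) ++ L2.map (fun q => q.2) → v ∈ d.values := by
    intro v hv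
    rw [hvals]
    rcases List.mem_append.mp hv with h | h
    · exact List.mem_append.mpr (Or.inl h)
    · exact List.mem_append.mpr (Or.inr (List.mem_cons_of_mem _ h))
  by_cases hm1 : m = 1
  · -- the decremented count hits 0: the key is deleted
    have hv'' : ((d.modify k0 0 (fun v => v - 1)).erase k0).values
        = L1.map (fun q => q.2) ++ L2.map (fun q => q.2) := by
      rw [PySem.Dict.values, PySem.Dict.erase, hmod]
      have hf1 : L1.filter (fun p => !(p.1 == k0)) = L1 :=
        List.filter_eq_self.mpr (fun q hq => by
          simpa using fun h => hk0L1 (by rw [← h]; exact List.mem_map_of_mem hq))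
      have hf2 : L2.filter (fun p => !(p.1 == k0)) = L2 :=
        List.filter_eq_self.mpr (fun q hq => by
          simpa using fun h => hk0L2 (by rw [← h]; exact List.mem_map_of_mem hq))
      rw [List.filter_append, List.filter_cons]
      simp [hf1, hf2]
    refine ⟨(d.modify k0 0 (fun v => v - 1)).erase k0, ?_, ?_, ?_, ?_, ?_⟩
    · rw [stepA, hm]
      simp only [hks, PySem.List.pyGet?, PySem.List.pyIdx?]
      norm_num [hgd', hm1]
    · -- Nodup keys after erase
      have : ((d.modify k0 0 (fun v => v - 1)).erase k0).keys
          = L1.map (fun q => q.1) ++ L2.map (fun q => q.1) := by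
        rw [PySem.Dict.keys, PySem.Dict.erase, hmod]
        have hf1 : L1.filter (fun p => !(p.1 == k0)) = L1 :=
          List.filter_eq_self.mpr (fun q hq => by
            simpa using fun h => hk0L1 (by rw [← h]; exact List.mem_map_of_mem hq))
        have hf2 : L2.filter (fun p => !(p.1 == k0)) = L2 :=
          List.filter_eq_self.mpr (fun q hq => by
            simpa using fun h => hk0L2 (by rw [← h]; exact List.mem_map_of_mem hq))
        rw [List.filter_append, List.filter_cons]
        simp [hf1, hf2]
      rw [this, List.nodup_append]
      exact ⟨hnd1, (List.nodup_cons.mp hnd2).2,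
        fun a ha b hb => hdisj a ha b (List.mem_cons_of_mem _ hb)⟩
    · -- positivity
      intro v hv
      exact hpos v (hsub v (by rwa [hv''] at hv))
    · -- sum
      rw [hv'', hvals, hm1]
      simp
      ring
    · -- sorted value list
      rw [hs, stepv]
      simp only [if_pos hm1]
      refine PySem.List.eq_of_perm_of_pairwise_le_of_injective (fun v => v)
        (fun a b h => h) ?_ (PySem.List.sorted_pairwise _ _) hpwtail
      exact (PySem.List.sorted_perm _ _ _).trans (by rw [hv'']; exact htail.symm)
  · -- the count stays positive: the key survives with value m - 1
    have hv' : (d.modify k0 0 (fun v => v - 1)).values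
        = L1.map (fun q => q.2) ++ (m - 1) :: L2.map (fun q => q.2) := by
      rw [PySem.Dict.values, hmod]
      simp
    refine ⟨d.modify k0 0 (fun v => v - 1), ?_, ?_, ?_, ?_, ?_⟩
    · rw [stepA, hm]
      simp only [hks, PySem.List.pyGet?, PySem.List.pyIdx?]
      norm_num [hgd']
      omega
    · -- keys unchanged
      have : (d.modify k0 0 (fun v => v - 1)).keys = d.keys := by
        rw [PySem.Dict.keys, hmod, hkeys]
        simp
      rwa [this]
    · -- positivity
      intro v hv
      rw [hv'] at hv
      rcases List.mem_append.mp hv with h | h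
      · exact hpos v (hsub v (List.mem_append.mpr (Or.inl h)))
      · rcases List.mem_cons.mp h with h | h
        · omega
        · exact hpos v (hsub v (List.mem_append.mpr (Or.inr h)))
    · -- sum
      rw [hv', hvals]
      simp
      ring
    · -- sorted value list
      rw [hs, stepv]
      simp only [if_neg hm1]
      refine PySem.List.eq_of_perm_of_pairwise_le_of_injective (fun v => v)
        (fun a b h => h) ?_ (PySem.List.sorted_pairwise _ _) ?_
      · refine (PySem.List.sorted_perm _ _ _).trans ?_
        rw [hv']
        exact List.perm_middle.trans (htail.symm.cons _)
      · exact List.pairwise_cons.mpr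
          ⟨fun x hx => show m - 1 ≤ x by have := hmle x hx; omega, hpwtail⟩

lemma loopA_spec (t : Nat) (d : PySem.Dict Char Int) (hnd : d.keys.Nodup)
    (hpos : ∀ v ∈ d.values, 1 ≤ v) (hle : (t : Int) ≤ d.values.sum) :
    ∃ d', loopA t (some d) = some d' ∧
      PySem.List.sorted d'.values (fun v => v) false
        = iterv t (PySem.List.sorted d.values (fun v => v) false) := by
  induction t generalizing d with
  | zero => exact ⟨d, rfl, rfl⟩
  | succ t ih =>
      have hne : d.values ≠ [] := by
        intro h
        rw [h] at hle
        simp at hle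
        omega
      obtain ⟨d1, hstep, hnd1, hpos1, hsum1, hsort1⟩ := stepA_spec d hnd hpos hne
      obtain ⟨d', hloop, hsort⟩ := ih d1 hnd1 hpos1 (by push_cast at hle ⊢; omega)
      refine ⟨d', ?_, ?_⟩
      · rw [loopA]; simpa [hstep] using hloop
      · rw [hsort, hsort1, iterv]

-- the counting loop of A builds counter
lemma countA_eq_counter (lst : List Char) :
    lst.foldl
      (fun d c => if d.contains c then d.modify c 0 (fun v => v + 1) else d.insert c 1)
      PySem.Dict.empty = PySem.Dict.counter lst := by
  rw [PySem.Dict.counter_eq_foldl]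
  apply PySem.List.foldl_congr_mem
  intro d c _
  by_cases h : d.contains c
  · simp [h, PySem.Dict.modify]
  · simp only [PySem.Dict.modify, PySem.Dict.getD_of_not_contains d 0 (by simpa using h)]
    simp [h]

lemma counter_values_pos (lst : List Char) :
    ∀ v ∈ (PySem.Dict.counter lst).values, 1 ≤ v := by
  intro v hv
  simp only [PySem.Dict.values, PySem.Dict.items_counter, List.map_map, List.mem_map] at hv
  obtain ⟨k, hk, rfl⟩ := hv
  have : k ∈ lst := (PySem.Set.mem_ofList lst k).mp hk
  have := List.count_pos_iff.mpr this
  simp only [Function.comp]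
  omega

lemma counter_values_sum (lst : List Char) :
    (PySem.Dict.counter lst).values.sum = (lst.length : Int) := by
  have hperm : (PySem.Set.ofList lst).Perm lst.dedup := by
    rw [List.perm_ext_iff_of_nodup (PySem.Set.nodup_ofList lst) lst.nodup_dedup]
    intro a
    rw [PySem.Set.mem_ofList, List.mem_dedup]
  calc (PySem.Dict.counter lst).values.sum
      = ((PySem.Set.ofList lst).map (fun k => (lst.count k : Int))).sum := by
        simp only [PySem.Dict.values, PySem.Dict.items_counter, List.map_map]
        rfl
    _ = (lst.dedup.map (fun k => (lst.count k : Int))).sum := (hperm.map _).sum_eq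
    _ = (lst.length : Int) := by
        rw [show (fun k => (lst.count k : Int))
              = (Nat.cast : Nat → Int) ∘ (fun k => lst.count k) from rfl]
        rw [← List.map_map, ← Nat.cast_list_sum, List.sum_map_count_dedup_eq_length]

-- ===== VERDICT (by name: the statement is the Claim_ definition above) =====
theorem solve_spec : Claim_equal_solve := by
  intro A B _ hpre
  unfold Spec_solve
  simp only [solve, solve_alt]
  rw [countA_eq_counter, PySem.Dict.foldl_insert_getD_add_one_eq_counter,
    foldl_bind_eq_loopA, length_pyRange0]
  have hlen := PySem.Str.len_eq A
  unfold Pre_solve at hpre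
  have hpre' : (B.toNat : Int) ≤ (PySem.Dict.counter A.toList).values.sum := by
    rw [counter_values_sum]
    omega
  obtain ⟨d', hloop, hsort⟩ := loopA_spec B.toNat (PySem.Dict.counter A.toList)
    (PySem.Dict.nodup_keys_counter A.toList) (counter_values_pos A.toList) hpre'
  rw [hloop]
  dsimp only
  -- the left side is the size of the final dict
  have hsize : ∀ (e : PySem.Dict Char Int),
      (e.size : Int) = ((PySem.List.sorted e.values (fun v => v) false).length : Int) := by
    intro e
    rw [(PySem.List.sorted_perm e.values (fun v => v) false).length_eq]
    simp [PySem.Dict.size, PySem.Dict.values]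
  -- the right side via removeSmallest_spec
  have hposs : ∀ v ∈ PySem.List.sorted (PySem.Dict.counter A.toList).values (fun v => v) false,
      1 ≤ v := by
    intro v hv
    exact counter_values_pos A.toList v
      ((PySem.List.sorted_perm _ _ _).mem_iff.mp hv)
  have hsum : (PySem.List.sorted (PySem.Dict.counter A.toList).values (fun v => v) false).sum
      = (PySem.Dict.counter A.toList).values.sum :=
    (PySem.List.sorted_perm _ _ _).sum_eq
  rw [removeSmallest_spec _ B _ hposs (by rw [hsum, counter_values_sum]; omega)]
  rw [hsize d', hsort]
  rw [(PySem.List.sorted_perm (PySem.Dict.counter A.toList).values (fun v => v) false).length_eq]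
  simp only [PySem.Dict.size, PySem.Dict.values, List.length_map]
  ring

theorem solve_raises : Claim_raises_solve := by
  unfold Claim_raises_solve
  constructor
  · intro A B _ hr
    unfold Raises_solve at hr
    unfold Pre_solve
    omega
  · exact ⟨by decide, by decide, by decide⟩

-- witness self-check: the raise-region witness indeed falls outside Pre_solve
theorem pvRaiseWitness_outside_pre_ok :
    ¬ Pre_solve pvRaiseWitness_solve.1 pvRaiseWitness_solve.2 :=
  solve_raises.1 pvRaiseWitness_solve.1 pvRaiseWitness_solve.2 (by decide) (by decide)
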